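-- pv_equiv track=rewrite | github.com/born-from-silence/bootstrap-v15 | creations/test_integration.py | brute_force_0indexed
-- ===== SOURCE A (Python) =====
-- from math import gcd
-- from functools import reduce
-- from itertools import product
--
-- def brute_force_0indexed(a, max_k=20):
--     n = len(a)
--     best_gcd = 0
--     best_ops = None
--     best_final = None
--
--     for ops in product(range(max_k + 1), repeat=n):
--         final = [a[i] + ops[i] * i for i in range(n)]  # i is 0-indexed position
--         g = reduce(gcd, final)
--         if g > best_gcd:
--             best_gcd = g
--             best_ops = ops
--             best_final = final
--
--     return best_gcd, best_ops, best_final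
-- ===== SOURCE B (Python) =====
-- from math import gcd
--
-- def brute_force_0indexed(a, max_k=20):
--     # DP over positions keyed by the gcd of the finals so far, instead of
--     # enumerating all (max_k+1)**n ops tuples: each gcd value is paired with the
--     # lexicographically smallest ops prefix reaching it.
--     n = len(a)
--     states = {a[0]: [0]} if (n > 0 and max_k >= 0) else {}
--     for i in range(1, n):
--         new = {}
--         for g, pre in states.items():
--             for k in range(max_k + 1):
--                 g2 = gcd(g, a[i] + k * i)
--                 if g2 not in new:
--                     new[g2] = pre + [k]
--         states = new
--     best_g, best_pre = 0, None
--     for g, pre in states.items():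
--         if g > best_g:
--             best_g, best_pre = g, pre
--     if best_pre is None:
--         return 0, None, None
--     return best_g, tuple(best_pre), [a[i] + best_pre[i] * i for i in range(n)]
-- ===== Notes on version B (the rewrite author's own statement) =====
-- stated objective: alternative
-- what changed: A enumerates all (max_k+1)^n ops tuples with itertools.product and recomputes the gcd of every final list; B does one pass over the positions, maintaining a dict from 'gcd of the finals so far' to the lexicographically smallest ops prefix reaching it, and picks the best key at the end.
-- outside the precondition, e.g. on brute_force_0indexed([], 20): A raises TypeError, B returns (0, None, None)
import Mathlib
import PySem

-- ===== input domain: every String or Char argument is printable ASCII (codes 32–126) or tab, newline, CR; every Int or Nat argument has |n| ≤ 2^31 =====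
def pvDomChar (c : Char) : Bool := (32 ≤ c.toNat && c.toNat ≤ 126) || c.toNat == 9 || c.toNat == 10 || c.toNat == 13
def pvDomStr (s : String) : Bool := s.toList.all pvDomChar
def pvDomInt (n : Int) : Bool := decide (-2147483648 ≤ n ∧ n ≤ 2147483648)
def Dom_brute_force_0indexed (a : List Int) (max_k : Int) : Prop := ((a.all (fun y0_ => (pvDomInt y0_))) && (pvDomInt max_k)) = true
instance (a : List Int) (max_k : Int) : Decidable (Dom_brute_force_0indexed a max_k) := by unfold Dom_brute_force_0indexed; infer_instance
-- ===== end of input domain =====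

-- B replaces A's exhaustive enumeration of all (max_k+1)^n ops tuples by a per-position
-- dynamic programme keyed by the gcd of the finals so far (keeping the lexicographically
-- smallest ops prefix per gcd value); objective: alternative (a different algorithm that
-- avoids the exponential enumeration).


-- ===== PORT A =====
-- math.gcd on two ints: the non-negative gcd of the absolute values (exact)
def pvGcd (x y : Int) : Int := (Int.gcd x y : Int)

-- itertools.product(range(max_k+1), repeat=n), in itertools order (rightmost position varies fastest)
def pvProd (ks : List Int) : Nat → List (List Int)
  | 0 => [[]]
  | n + 1 => ks.flatMap (fun k => (pvProd ks n).map (fun t => k :: t))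

-- functools.reduce(gcd, final); on [] Python raises TypeError (excluded by Pre_), 0 here is junk
def pvReduceGcd : List Int → Int
  | [] => 0
  | x :: r => r.foldl pvGcd x

def brute_force_0indexed (a : List Int) (max_k : Int) : Int × Option (List Int) × Option (List Int) :=
  let n := a.length
  (pvProd (PySem.List.pyRange 0 (max_k + 1) 1) n).foldl
    (fun st ops =>
      let final := (PySem.List.pyRange 0 (n : Int) 1).map
        (fun i => PySem.List.pyGetD a i 0 + PySem.List.pyGetD ops i 0 * i)
      let g := pvReduceGcd final
      if g > st.1 then (g, some ops, some final) else st)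
    (0, none, none)

-- ===== PORT B =====
def brute_force_0indexed_alt (a : List Int) (max_k : Int) : Int × Option (List Int) × Option (List Int) :=
  let n := a.length
  -- states = {a[0]: [0]} if n > 0 and max_k >= 0 else {}
  let init : PySem.Dict Int (List Int) :=
    if 0 < n ∧ 0 ≤ max_k then PySem.Dict.empty.insert (PySem.List.pyGetD a 0 0) [0]
    else PySem.Dict.empty
  -- for i in range(1, n): new = {}; for g, pre in states.items(): for k in range(max_k+1): ...
  let states := (PySem.List.pyRange 1 (n : Int) 1).foldl
    (fun st i =>
      st.items.foldl
        (fun new gp =>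
          (PySem.List.pyRange 0 (max_k + 1) 1).foldl
            (fun new k =>
              let g2 := pvGcd gp.1 (PySem.List.pyGetD a i 0 + k * i)
              if new.contains g2 then new else new.insert g2 (gp.2 ++ [k]))
            new)
        PySem.Dict.empty)
    init
  -- best_g, best_pre = 0, None; for g, pre in states.items(): if g > best_g: ...
  let best := states.items.foldl
    (fun bb gp => if gp.1 > bb.1 then (gp.1, some gp.2) else bb)
    ((0 : Int), (none : Option (List Int)))
  match best.2 with
  | none => (0, none, none)
  | some pre =>
      (best.1, some pre,
        some ((PySem.List.pyRange 0 (n : Int) 1).map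
          (fun i => PySem.List.pyGetD a i 0 + PySem.List.pyGetD pre i 0 * i)))

-- ===== PRECONDITION & SPEC =====
-- Pre_ excludes only a = [], on which Python's reduce(gcd, []) raises TypeError (B returns (0, None, None) there).
def Pre_brute_force_0indexed (a : List Int) (max_k : Int) : Prop := a ≠ []
instance (a : List Int) (max_k : Int) : Decidable (Pre_brute_force_0indexed a max_k) := by
  unfold Pre_brute_force_0indexed; infer_instance

def pvWitness_brute_force_0indexed : List Int × Int := ([6, 4], 2)

def Spec_brute_force_0indexed (a : List Int) (max_k : Int) (out : Int × Option (List Int) × Option (List Int)) : Prop := out = brute_force_0indexed_alt a max_k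
instance (a : List Int) (max_k : Int) (out : Int × Option (List Int) × Option (List Int)) : Decidable (Spec_brute_force_0indexed a max_k out) := by unfold Spec_brute_force_0indexed; infer_instance

-- ===== CLAIM (what is proved, stated in full; the proofs are below) =====
def Claim_equal_brute_force_0indexed : Prop := ∀ (a : List Int) (max_k : Int), Dom_brute_force_0indexed a max_k → Pre_brute_force_0indexed a max_k → Spec_brute_force_0indexed a max_k (brute_force_0indexed a max_k)
-- ===== LEMMAS AND PROOFS =====

-- the "keep the strictly best, first achiever" fold step shared by both ports
def pvBStep (bb : Int × Option (List Int)) (gp : Int × List Int) : Int × Option (List Int) :=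
  if gp.1 > bb.1 then (gp.1, some gp.2) else bb

-- the dict loop body: insert only if the key is absent
def pvIIA (d : PySem.Dict Int (List Int)) (q : Int × List Int) : PySem.Dict Int (List Int) :=
  if d.contains q.1 then d else d.insert q.1 q.2

-- keep the first pair for each key not yet seen
def pvDedupF (seen : List Int) : List (Int × List Int) → List (Int × List Int)
  | [] => []
  | q :: r => if q.1 ∈ seen then pvDedupF seen r else q :: pvDedupF (q.1 :: seen) r

-- all length-j tuples over ks, lexicographic, built by appending at the right
def pvProdSnoc (ks : List Int) : Nat → List (List Int)
  | 0 => [[]]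
  | j + 1 => (pvProdSnoc ks j).flatMap (fun p => ks.map (fun k => p ++ [k]))

def pvFinals (a p : List Int) : List Int :=
  (List.range p.length).map (fun i => a.getD i 0 + p.getD i 0 * (i : Int))

def pvKey (a p : List Int) : Int := pvReduceGcd (pvFinals a p)

def pvPairs (a ks : List Int) (j : Nat) : List (Int × List Int) :=
  (pvProdSnoc ks j).map (fun p => (pvKey a p, p))

def pvF (a ks : List Int) (i : Int) (q : Int × List Int) : List (Int × List Int) :=
  ks.map (fun k => (pvGcd q.1 (PySem.List.pyGetD a i 0 + k * i), q.2 ++ [k]))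

lemma pvProdSnoc_length {ks : List Int} {j : Nat} {p : List Int} (hp : p ∈ pvProdSnoc ks j) :
    p.length = j := by
  induction j generalizing p with
  | zero => simp [pvProdSnoc] at hp; simp [hp]
  | succ j ih =>
    simp [pvProdSnoc] at hp
    obtain ⟨q, hq, k, _, rfl⟩ := hp
    simp [ih hq]

lemma pvProd_succ_snoc (ks : List Int) (j : Nat) :
    pvProd ks (j + 1) = (pvProd ks j).flatMap (fun p => ks.map (fun k => p ++ [k])) := by
  induction j with
  | zero => simp [pvProd, List.map_eq_flatMap]
  | succ j ih =>
    conv_lhs => rw [show pvProd ks (j + 1 + 1) =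
      ks.flatMap (fun k => (pvProd ks (j + 1)).map (fun t => k :: t)) from rfl, ih]
    conv_rhs => rw [show pvProd ks (j + 1) =
      ks.flatMap (fun k => (pvProd ks j).map (fun t => k :: t)) from rfl]
    simp [List.map_flatMap, List.flatMap_map, List.flatMap_assoc, Function.comp_def]

lemma pvProdSnoc_eq_pvProd (ks : List Int) (j : Nat) : pvProdSnoc ks j = pvProd ks j := by
  induction j with
  | zero => rfl
  | succ j ih => rw [pvProd_succ_snoc, pvProdSnoc, ih]

lemma pvFinals_snoc (a p : List Int) (k : Int) :
    pvFinals a (p ++ [k]) = pvFinals a p ++ [a.getD p.length 0 + k * (p.length : Int)] := by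
  unfold pvFinals
  rw [List.length_append, List.length_singleton, List.range_succ, List.map_append]
  congr 1
  · apply List.map_congr_left
    intro i hi
    rw [List.mem_range] at hi
    rw [List.getD_append _ _ _ _ hi]
  · simp [List.getD_eq_getElem?_getD]

lemma pvReduceGcd_snoc (xs : List Int) (hxs : xs ≠ []) (y : Int) :
    pvReduceGcd (xs ++ [y]) = pvGcd (pvReduceGcd xs) y := by
  cases xs with
  | nil => exact absurd rfl hxs
  | cons x r => simp [pvReduceGcd, List.foldl_append]

lemma pvFinals_ne_nil (a p : List Int) (hp : p ≠ []) : pvFinals a p ≠ [] := by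
  intro h
  unfold pvFinals at h
  rw [List.map_eq_nil_iff, List.range_eq_nil] at h
  exact hp (List.length_eq_zero_iff.mp h)

lemma pvKey_snoc (a p : List Int) (hp : p ≠ []) (k : Int) :
    pvKey a (p ++ [k]) = pvGcd (pvKey a p) (a.getD p.length 0 + k * (p.length : Int)) := by
  unfold pvKey
  rw [pvFinals_snoc, pvReduceGcd_snoc _ (pvFinals_ne_nil a p hp)]

-- ---- pvBStep facts ----
lemma pvBStep_fst_le (bb : Int × Option (List Int)) (gp : Int × List Int) :
    bb.1 ≤ (pvBStep bb gp).1 := by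
  unfold pvBStep; split
  · next h => exact le_of_lt h
  · exact le_refl _

lemma pvBStep_fst_ge (bb : Int × Option (List Int)) (gp : Int × List Int) :
    gp.1 ≤ (pvBStep bb gp).1 := by
  unfold pvBStep; split
  · exact le_refl _
  · next h => omega

lemma foldl_pvBStep_dedupF :
    ∀ (l : List (Int × List Int)) (seen : List Int) (bb : Int × Option (List Int)),
      (∀ c ∈ seen, c ≤ bb.1) →
      (pvDedupF seen l).foldl pvBStep bb = l.foldl pvBStep bb := by
  intro l
  induction l with
  | nil => intro seen bb _; rfl
  | cons q r ih =>
    intro seen bb hs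
    rw [pvDedupF]
    by_cases hq : q.1 ∈ seen
    · rw [if_pos hq, List.foldl_cons]
      have hstep : pvBStep bb q = bb := by
        unfold pvBStep
        rw [if_neg]
        have := hs q.1 hq
        omega
      rw [hstep]
      exact ih seen bb hs
    · rw [if_neg hq, List.foldl_cons, List.foldl_cons]
      apply ih
      intro c hc
      rcases List.mem_cons.mp hc with h | h
      · rw [h]; exact pvBStep_fst_ge bb q
      · exact le_trans (hs c h) (pvBStep_fst_le bb q)

-- once the best option is set it stays set
lemma foldl_pvBStep_some (l : List (Int × List Int)) (g : Int) (p : List Int) :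
    (l.foldl pvBStep (g, some p)).2.isSome := by
  induction l generalizing g p with
  | nil => simp
  | cons q r ih =>
    rw [List.foldl_cons]
    unfold pvBStep
    split
    · exact ih q.1 q.2
    · exact ih g p

lemma foldl_pvBStep_none (l : List (Int × List Int))
    (h : (l.foldl pvBStep ((0 : Int), (none : Option (List Int)))).2 = none) :
    l.foldl pvBStep ((0 : Int), (none : Option (List Int))) = (0, none) := by
  induction l with
  | nil => rfl
  | cons q r ih =>
    rw [List.foldl_cons] at *
    by_cases hq : pvBStep ((0 : Int), (none : Option (List Int))) q = (0, none)
    · rw [hq] at h ⊢; exact ih h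
    · exfalso
      have hsome : pvBStep ((0 : Int), (none : Option (List Int))) q = (q.1, some q.2) := by
        unfold pvBStep at hq ⊢
        split at hq <;> simp_all
      rw [hsome] at h
      have := foldl_pvBStep_some r q.1 q.2
      rw [h] at this
      simp at this

-- ---- pvDedupF facts ----
lemma pvDedupF_congr :
    ∀ (l : List (Int × List Int)) (s1 s2 : List Int), (∀ x, x ∈ s1 ↔ x ∈ s2) →
      pvDedupF s1 l = pvDedupF s2 l := by
  intro l
  induction l with
  | nil => intro _ _ _; rfl
  | cons q r ih =>
    intro s1 s2 h
    rw [pvDedupF, pvDedupF]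
    by_cases hq : q.1 ∈ s1
    · rw [if_pos hq, if_pos ((h q.1).mp hq)]
      exact ih s1 s2 h
    · rw [if_neg hq, if_neg (fun hc => hq ((h q.1).mpr hc))]
      rw [ih (q.1 :: s1) (q.1 :: s2) (by intro x; simp [h x])]

lemma pvDedupF_all_seen :
    ∀ (u : List (Int × List Int)) (seen : List Int), (∀ x ∈ u, x.1 ∈ seen) →
      pvDedupF seen u = [] := by
  intro u
  induction u with
  | nil => intro _ _; rfl
  | cons q r ih =>
    intro seen h
    rw [pvDedupF, if_pos (h q (by simp))]
    exact ih seen (fun x hx => h x (by simp [hx]))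

lemma pvDedupF_append :
    ∀ (u w : List (Int × List Int)) (seen : List Int),
      pvDedupF seen (u ++ w) = pvDedupF seen u ++ pvDedupF (u.map Prod.fst ++ seen) w := by
  intro u
  induction u with
  | nil => intro w seen; rfl
  | cons q r ih =>
    intro w seen
    rw [List.cons_append, pvDedupF, pvDedupF]
    by_cases hq : q.1 ∈ seen
    · rw [if_pos hq, if_pos hq, ih]
      apply congrArg
      apply pvDedupF_congr
      intro x
      simp only [List.map_cons, List.cons_append, List.mem_cons, List.mem_append]
      constructor
      · tauto
      · rintro (h | h | h) <;> try tauto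
        · subst h; right; exact hq
    · rw [if_neg hq, if_neg hq, List.cons_append, ih]
      apply congrArg
      apply congrArg
      apply pvDedupF_congr
      intro x
      simp only [List.map_cons, List.cons_append, List.mem_cons, List.mem_append]
      tauto

lemma pvDedupF_drop_covered :
    ∀ (u w : List (Int × List Int)) (K : List Int), (∀ x ∈ u, x.1 ∈ K) →
      pvDedupF K (u ++ w) = pvDedupF K w := by
  intro u
  induction u with
  | nil => intro w K _; rfl
  | cons q r ih =>
    intro w K h
    rw [List.cons_append, pvDedupF, if_pos (h q (by simp))]
    exact ih w K (fun x hx => h x (by simp [hx]))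

-- deduplicating the source before expanding does not change the dedup of the expansion,
-- because the keys of an expansion depend only on the key of the source pair
lemma pvDedupF_flatMap (ks : List Int) (σ : Int → Int → Int) :
    ∀ (l : List (Int × List Int)) (K S : List Int),
      (∀ g ∈ S, ∀ k ∈ ks, σ g k ∈ K) →
      pvDedupF K (l.flatMap (fun q => ks.map (fun k => (σ q.1 k, q.2 ++ [k])))) =
      pvDedupF K ((pvDedupF S l).flatMap (fun q => ks.map (fun k => (σ q.1 k, q.2 ++ [k])))) := by
  intro l
  induction l with
  | nil => intro K S _; rfl
  | cons q r ih =>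
    intro K S hKS
    rw [List.flatMap_cons, pvDedupF]
    by_cases hq : q.1 ∈ S
    · rw [if_pos hq]
      rw [pvDedupF_drop_covered _ _ K (by
        intro x hx
        simp only [List.mem_map] at hx
        obtain ⟨k, hk, rfl⟩ := hx
        exact hKS q.1 hq k hk)]
      exact ih K S hKS
    · rw [if_neg hq, List.flatMap_cons]
      rw [pvDedupF_append, pvDedupF_append]
      apply congrArg
      rw [ih ((ks.map (fun k => (σ q.1 k, q.2 ++ [k]))).map Prod.fst ++ K) (q.1 :: S) (by
        intro g hg k hk
        rcases List.mem_cons.mp hg with h | h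
        · subst h
          apply List.mem_append_left
          simp only [List.map_map, List.mem_map]
          exact ⟨k, hk, rfl⟩
        · exact List.mem_append_right _ (hKS g h k hk))]

-- ---- dict fold characterisation ----
lemma dictFold_items :
    ∀ (l : List (Int × List Int)) (d : PySem.Dict Int (List Int)),
      (l.foldl pvIIA d).items = d.items ++ pvDedupF d.keys l := by
  intro l
  induction l with
  | nil => intro d; simp [pvDedupF]
  | cons q r ih =>
    intro d
    rw [List.foldl_cons, pvDedupF]
    by_cases hq : d.contains q.1
    · rw [if_pos (by rw [PySem.Dict.contains_iff_mem_keys] at hq; exact hq)]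
      have : pvIIA d q = d := by unfold pvIIA; rw [if_pos hq]
      rw [this, ih]
    · have hmem : q.1 ∉ d.keys := by
        rw [← PySem.Dict.contains_iff_mem_keys]
        simp [hq]
      rw [if_neg hmem]
      have hstep : pvIIA d q = d.insert q.1 q.2 := by unfold pvIIA; rw [if_neg (by simp [hq])]
      rw [hstep, ih]
      have hq' : d.contains q.1 = false := by simpa using hq
      rw [PySem.Dict.items_insert_of_not_contains _ _ hq']
      rw [List.append_assoc, List.singleton_append]
      apply congrArg
      apply congrArg
      apply pvDedupF_congr
      intro x
      rw [PySem.Dict.mem_keys_insert]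
      simp

-- ---- bridging the ports to the proof-side vocabulary ----
lemma pvRange_map_eq (n : Nat) :
    PySem.List.pyRange 0 (n : Int) 1 = (List.range n).map (fun k : Nat => (k : Int)) := by
  exact PySem.List.pyRange_zero_nat n

lemma finMap_eq (a : List Int) (n : Nat) (t : List Int) (ht : t.length = n) :
    (PySem.List.pyRange 0 (n : Int) 1).map
      (fun i => PySem.List.pyGetD a i 0 + PySem.List.pyGetD t i 0 * i) = pvFinals a t := by
  rw [pvRange_map_eq, List.map_map]
  unfold pvFinals
  rw [ht]
  apply List.map_congr_left
  intro i _
  simp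

lemma A_fold_char (finF : List Int → List Int) :
    ∀ (l : List (List Int)) (g0 : Int) (o0 : Option (List Int)),
      l.foldl (fun st ops =>
          if pvReduceGcd (finF ops) > st.1 then (pvReduceGcd (finF ops), some ops, some (finF ops)) else st)
        (g0, o0, o0.map finF)
      = (((l.map (fun t => (pvReduceGcd (finF t), t))).foldl pvBStep (g0, o0)).1,
         ((l.map (fun t => (pvReduceGcd (finF t), t))).foldl pvBStep (g0, o0)).2,
         ((l.map (fun t => (pvReduceGcd (finF t), t))).foldl pvBStep (g0, o0)).2.map finF) := by
  intro l
  induction l with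
  | nil => intro g0 o0; rfl
  | cons t r ih =>
    intro g0 o0
    rw [List.foldl_cons, List.map_cons, List.foldl_cons]
    by_cases h : pvReduceGcd (finF t) > g0
    · rw [if_pos h, show pvBStep (g0, o0) (pvReduceGcd (finF t), t) = (pvReduceGcd (finF t), some t)
          from by unfold pvBStep; rw [if_pos h]]
      exact ih (pvReduceGcd (finF t)) (some t)
    · rw [if_neg h, show pvBStep (g0, o0) (pvReduceGcd (finF t), t) = (g0, o0)
          from by unfold pvBStep; rw [if_neg h]]
      exact ih g0 o0

lemma A_fold_char0 (finF : List Int → List Int) (l : List (List Int)) :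
    l.foldl (fun st ops =>
        if pvReduceGcd (finF ops) > st.1 then (pvReduceGcd (finF ops), some ops, some (finF ops)) else st)
      ((0 : Int), (none : Option (List Int)), (none : Option (List Int)))
      = (((l.map (fun t => (pvReduceGcd (finF t), t))).foldl pvBStep (0, none)).1,
         ((l.map (fun t => (pvReduceGcd (finF t), t))).foldl pvBStep (0, none)).2,
         ((l.map (fun t => (pvReduceGcd (finF t), t))).foldl pvBStep (0, none)).2.map finF) :=
  A_fold_char finF l 0 none

lemma tuples_pairs (a ks : List Int) (n : Nat) :
    (pvProd ks n).map (fun t =>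
        (pvReduceGcd ((PySem.List.pyRange 0 (n : Int) 1).map
          (fun i => PySem.List.pyGetD a i 0 + PySem.List.pyGetD t i 0 * i)), t))
      = pvPairs a ks n := by
  rw [← pvProdSnoc_eq_pvProd]
  unfold pvPairs
  apply List.map_congr_left
  intro t ht
  rw [finMap_eq a n t (pvProdSnoc_length ht)]
  rfl

lemma B_step (a ks : List Int) (j : Nat) (hj : 1 ≤ j) :
    ((pvDedupF [] (pvPairs a ks j)).foldl
        (fun new gp =>
          ks.foldl
            (fun new k =>
              if new.contains (pvGcd gp.1 (PySem.List.pyGetD a (j : Int) 0 + k * (j : Int))) then new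
              else new.insert (pvGcd gp.1 (PySem.List.pyGetD a (j : Int) 0 + k * (j : Int))) (gp.2 ++ [k]))
            new)
        PySem.Dict.empty).items
      = pvDedupF [] (pvPairs a ks (j + 1)) := by
  have hinner : ∀ (new : PySem.Dict Int (List Int)) (gp : Int × List Int),
      ks.foldl
        (fun new k =>
          if new.contains (pvGcd gp.1 (PySem.List.pyGetD a (j : Int) 0 + k * (j : Int))) then new
          else new.insert (pvGcd gp.1 (PySem.List.pyGetD a (j : Int) 0 + k * (j : Int))) (gp.2 ++ [k]))
        new
      = (ks.map (fun k => (pvGcd gp.1 (PySem.List.pyGetD a (j : Int) 0 + k * (j : Int)), gp.2 ++ [k]))).foldl pvIIA new := by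
    intro new gp
    rw [List.foldl_map]
    rfl
  simp only [hinner]
  rw [← List.foldl_flatMap, dictFold_items]
  rw [show (PySem.Dict.empty : PySem.Dict Int (List Int)).items = [] from rfl]
  rw [show (PySem.Dict.empty : PySem.Dict Int (List Int)).keys = [] from rfl]
  rw [List.nil_append]
  rw [← pvDedupF_flatMap ks (fun g k => pvGcd g (PySem.List.pyGetD a (j : Int) 0 + k * (j : Int)))
        (pvPairs a ks j) [] [] (fun g hg => absurd hg List.not_mem_nil)]
  have hexp : (pvPairs a ks j).flatMap
      (fun q => ks.map (fun k => (pvGcd q.1 (PySem.List.pyGetD a (j : Int) 0 + k * (j : Int)), q.2 ++ [k])))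
      = pvPairs a ks (j + 1) := by
    unfold pvPairs
    rw [show pvProdSnoc ks (j + 1) = (pvProdSnoc ks j).flatMap (fun p => ks.map (fun k => p ++ [k])) from rfl]
    rw [List.flatMap_map, List.map_flatMap]
    apply List.flatMap_congr
    intro p hp
    rw [List.map_map]
    apply List.map_congr_left
    intro k _
    have hlen := pvProdSnoc_length hp
    have hne : p ≠ [] := by
      intro h
      rw [h] at hlen
      simp at hlen
      omega
    simp only [Function.comp_def, pvKey_snoc a p hne k, hlen]
    simp
  rw [hexp]

lemma B_base (a : List Int) (max_k : Int) (ha : 0 < a.length) :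
    (if 0 < a.length ∧ 0 ≤ max_k then PySem.Dict.empty.insert (PySem.List.pyGetD a 0 0) [0]
     else PySem.Dict.empty).items
      = pvDedupF [] (pvPairs a (PySem.List.pyRange 0 (max_k + 1) 1) 1) := by
  have hpairs : ∀ ks : List Int, pvPairs a ks 1 = ks.map (fun k => (a.getD 0 0, [k])) := by
    intro ks
    unfold pvPairs
    rw [show pvProdSnoc ks 1 = [([] : List Int)].flatMap (fun p => ks.map (fun k => p ++ [k])) from rfl]
    simp only [List.flatMap_cons, List.flatMap_nil, List.append_nil, List.nil_append, List.map_map]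
    apply List.map_congr_left
    intro k _
    simp [pvKey, pvFinals, pvReduceGcd, List.range_succ]
  by_cases hk : 0 ≤ max_k
  · rw [if_pos ⟨ha, hk⟩, hpairs]
    rw [PySem.List.pyRange_one_cons (by omega : (0 : Int) < max_k + 1)]
    rw [List.map_cons, pvDedupF, if_neg List.not_mem_nil]
    rw [pvDedupF_all_seen _ _ (by
      intro x hx
      simp only [List.mem_map] at hx
      obtain ⟨k, _, rfl⟩ := hx
      simp)]
    rw [PySem.Dict.items_insert_of_not_contains _ _ (by simp)]
    rw [show (PySem.Dict.empty : PySem.Dict Int (List Int)).items = [] from rfl, List.nil_append,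
      PySem.List.pyGetD_zero]
  · rw [if_neg (by tauto)]
    have hks : PySem.List.pyRange 0 (max_k + 1) 1 = [] := by
      rw [PySem.List.pyRange_one]
      have : (max_k + 1 - 0).toNat = 0 := by omega
      rw [this]
      rfl
    rw [hpairs, hks]
    rfl

lemma B_states_items (a : List Int) (max_k : Int) (j : Nat) (hj : 1 ≤ j) (ha : 0 < a.length) :
    ((PySem.List.pyRange 1 (j : Int) 1).foldl
        (fun st i =>
          st.items.foldl
            (fun new gp =>
              (PySem.List.pyRange 0 (max_k + 1) 1).foldl
                (fun new k =>
                  if new.contains (pvGcd gp.1 (PySem.List.pyGetD a i 0 + k * i)) then new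
                  else new.insert (pvGcd gp.1 (PySem.List.pyGetD a i 0 + k * i)) (gp.2 ++ [k]))
                new)
            PySem.Dict.empty)
        (if 0 < a.length ∧ 0 ≤ max_k then PySem.Dict.empty.insert (PySem.List.pyGetD a 0 0) [0]
         else PySem.Dict.empty)).items
      = pvDedupF [] (pvPairs a (PySem.List.pyRange 0 (max_k + 1) 1) j) := by
  induction j with
  | zero => omega
  | succ j ih =>
    by_cases hj0 : j = 0
    · subst hj0
      have h1 : PySem.List.pyRange 1 ((1 : Nat) : Int) 1 = [] := by
        rw [PySem.List.pyRange_one]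
        rfl
      rw [h1, List.foldl_nil]
      exact B_base a max_k ha
    · have hj1 : 1 ≤ j := by omega
      have hcast : ((j + 1 : Nat) : Int) = (j : Int) + 1 := by push_cast; ring
      rw [hcast, show PySem.List.pyRange 1 ((j : Int) + 1) 1 = PySem.List.pyRange 1 (j : Int) 1 ++ [(j : Int)]
        from PySem.List.pyRange_one_succ_right (by exact_mod_cast hj1), List.foldl_append,
        List.foldl_cons, List.foldl_nil, ih hj1]
      exact B_step a (PySem.List.pyRange 0 (max_k + 1) 1) j hj1

-- ===== VERDICT (by name: the statement is the Claim_ definition above) =====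
theorem brute_force_0indexed_spec : Claim_equal_brute_force_0indexed := by
  intro a max_k _ hpre
  unfold Spec_brute_force_0indexed brute_force_0indexed brute_force_0indexed_alt
  dsimp only
  have hn : 0 < a.length := by
    cases a with
    | nil => exact absurd rfl hpre
    | cons x r => simp
  rw [B_states_items a max_k a.length (by omega) hn]
  rw [show (fun (bb : Int × Option (List Int)) (gp : Int × List Int) =>
        if gp.1 > bb.1 then (gp.1, some gp.2) else bb) = pvBStep from rfl]
  rw [foldl_pvBStep_dedupF _ [] _ (fun c hc => absurd hc List.not_mem_nil)]
  rw [A_fold_char0 (fun ops => (PySem.List.pyRange 0 ((a.length : Nat) : Int) 1).map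
        (fun i => PySem.List.pyGetD a i 0 + PySem.List.pyGetD ops i 0 * i))
      (pvProd (PySem.List.pyRange 0 (max_k + 1) 1) a.length)]
  rw [tuples_pairs a (PySem.List.pyRange 0 (max_k + 1) 1) a.length]
  cases hro : ((pvPairs a (PySem.List.pyRange 0 (max_k + 1) 1) a.length).foldl pvBStep
      ((0 : Int), (none : Option (List Int)))).2 with
  | none =>
    have h0 := foldl_pvBStep_none _ hro
    rw [h0]
    rfl
  | some pre =>
    rfl
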